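-- pv_equiv track=rewrite | github.com/AlertaDengue/PySUS | pysus/preprocessing/decoders.py | calculate_digit
-- ===== SOURCE A (Python) =====
-- def calculate_digit(geocode):
--     """
--     Calcula o digito verificador do geocódigo de município com 6 dígitos
--     :param geocode: geocódigo com 6 dígitos
--     :return: dígito verificador
--     """
--     peso = [1, 2, 1, 2, 1, 2, 0]
--     soma = 0
--     geocode = str(geocode)
--     for i in range(6):
--         valor = int(geocode[i]) * peso[i]
--         soma += sum([int(d) for d in str(valor)]) if valor > 9 else valor
--     dv = 0 if soma % 10 == 0 else (10 - (soma % 10))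
--     return dv
-- ===== SOURCE B (Python) =====
-- def calculate_digit(geocode):
--     """
--     Calcula o digito verificador do geocódigo de município com 6 dígitos
--     :param geocode: geocódigo com 6 dígitos
--     :return: dígito verificador
--     """
--     n = geocode
--     if n < 100000:
--         raise ValueError("geocode must have at least 6 digits")
--     luhn = (0, 2, 4, 6, 8, 1, 3, 5, 7, 9)
--     while n >= 1000000:          # keep only the 6 leading decimal digits
--         n //= 10
--     soma = 0
--     use_luhn = True              # rightmost of the six digits has weight 2
--     for _ in range(6):
--         n, d = divmod(n, 10)
--         soma += luhn[d] if use_luhn else d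
--         use_luhn = not use_luhn
--     return -soma % 10
-- ===== Notes on version B (the rewrite author's own statement) =====
-- stated objective: alternative
-- what changed: B never converts to strings: it strips trailing digits with integer floor division, then peels the six digits right-to-left with divmod, replacing A's per-position str()/int() round-trips and the digit-sum of str(valor) by a precomputed Luhn doubling table lookup; it validates that the geocode has at least 6 digits.
import Mathlib
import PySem

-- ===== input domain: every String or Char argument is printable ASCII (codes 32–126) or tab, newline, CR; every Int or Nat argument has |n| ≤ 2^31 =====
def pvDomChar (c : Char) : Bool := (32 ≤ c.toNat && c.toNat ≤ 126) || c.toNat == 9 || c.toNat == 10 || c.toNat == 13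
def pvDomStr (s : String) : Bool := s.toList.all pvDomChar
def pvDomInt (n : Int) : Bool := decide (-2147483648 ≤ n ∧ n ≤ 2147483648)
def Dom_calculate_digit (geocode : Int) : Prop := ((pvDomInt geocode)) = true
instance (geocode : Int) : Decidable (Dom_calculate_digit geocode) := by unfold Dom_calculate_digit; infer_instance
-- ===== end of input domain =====

-- B computes the check digit by pure integer arithmetic (divmod digit peeling and a precomputed
-- Luhn doubling table) instead of A's string conversions and per-value digit sums of str(valor);
-- equal return values are proved on Pre_ (geocode with at least 6 digits, where A returns).


-- ===== PORT A =====
-- literal port of A; the `getD 0` defaults stand where Python raises (IndexError on a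
-- short string, ValueError on '-'), which Pre_calculate_digit excludes.
def calculate_digit (geocode : Int) : Int :=
  let peso : List Int := [1, 2, 1, 2, 1, 2, 0]
  let g : String := PySem.Int.toStr geocode
  let soma : Int := (PySem.List.pyRange 0 6 1).foldl (fun soma i =>
    let di : Int := ((PySem.Str.pyGet? g i).map (fun c => (PySem.Int.ofChars? [c]).getD 0)).getD 0
    let valor : Int := di * PySem.List.pyGetD peso i 0
    soma + (if 9 < valor then
              ((PySem.Int.toChars valor).map (fun d => (PySem.Int.ofChars? [d]).getD 0)).sum
            else valor)) 0
  if PySem.Int.mod soma 10 = 0 then 0 else 10 - PySem.Int.mod soma 10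

-- ===== PORT B =====
-- Source B raises ValueError for geocode < 100000 (input validation); those inputs are outside
-- Pre_calculate_digit, so the port simply computes on (its value there is not claimed).
def pvLuhn : List Int := [0, 2, 4, 6, 8, 1, 3, 5, 7, 9]

-- the `while n >= 1000000: n //= 10` loop of B
def pvStrip (n : Int) : Int :=
  if 1000000 ≤ n then pvStrip (PySem.Int.floordiv n 10) else n
termination_by n.toNat
decreasing_by
  rw [PySem.Int.floordiv_eq_ediv_of_pos (by omega)]
  omega

def calculate_digit_alt (geocode : Int) : Int :=
  let st := (PySem.List.pyRange 0 6 1).foldl (fun (st : Int × Int × Bool) _ =>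
      let d := PySem.Int.mod st.1 10
      let n' := PySem.Int.floordiv st.1 10
      (n', st.2.1 + (if st.2.2 then PySem.List.pyGetD pvLuhn d 0 else d), !st.2.2))
    (pvStrip geocode, 0, true)
  PySem.Int.mod (-st.2.1) 10

-- ===== PRECONDITION & SPEC =====
-- Pre_ excludes exactly the inputs on which A raises: for geocode < 100000, str(geocode)
-- has fewer than 6 digit characters (IndexError) or starts with '-' (ValueError).
def Pre_calculate_digit (geocode : Int) : Prop := 100000 ≤ geocode
instance (geocode : Int) : Decidable (Pre_calculate_digit geocode) := by unfold Pre_calculate_digit; infer_instance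
def pvWitness_calculate_digit : Int := (123456)
def Spec_calculate_digit (geocode : Int) (out : Int) : Prop := out = calculate_digit_alt geocode
instance (geocode : Int) (out : Int) : Decidable (Spec_calculate_digit geocode out) := by unfold Spec_calculate_digit; infer_instance
-- ===== CLAIM (what is proved, stated in full; the proofs are below) =====
def Claim_equal_calculate_digit : Prop := ∀ (geocode : Int), Dom_calculate_digit geocode → Pre_calculate_digit geocode → Spec_calculate_digit geocode (calculate_digit geocode)

-- ===== LEMMAS AND PROOFS =====
lemma pvStrip_spec (m : Nat) (hm : 100000 ≤ m) :
    ∃ h : Nat, pvStrip (m : Int) = (h : Int) ∧ 100000 ≤ h ∧ h < 1000000 ∧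
      ∃ suf : List Char, Nat.toDigits 10 m = Nat.toDigits 10 h ++ suf := by
  induction m using Nat.strong_induction_on with
  | _ m ih =>
    by_cases hbig : 1000000 ≤ m
    · have hdiv : PySem.Int.floordiv (m : Int) 10 = ((m / 10 : Nat) : Int) := by
        rw [PySem.Int.floordiv_eq_ediv_of_pos (by omega)]
        omega
      obtain ⟨h, hv, h1, h2, suf, hsuf⟩ := ih (m / 10) (by omega) (by omega)
      refine ⟨h, ?_, h1, h2, suf ++ [Nat.digitChar (m % 10)], ?_⟩
      · rw [pvStrip, if_pos (by exact_mod_cast hbig), hdiv, hv]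
      · rw [Nat.toDigits_eq_if (by omega), if_neg (by omega), hsuf]
        simp
    · exact ⟨m, by rw [pvStrip, if_neg (by exact_mod_cast hbig)], hm, by omega, [], by simp⟩

lemma six_digits (h : Nat) (h1 : 100000 ≤ h) (h2 : h < 1000000) :
    ∃ d0 d1 d2 d3 d4 d5 : Nat,
      0 < d0 ∧ d0 < 10 ∧ d1 < 10 ∧ d2 < 10 ∧ d3 < 10 ∧ d4 < 10 ∧ d5 < 10 ∧
      h = ((((d0 * 10 + d1) * 10 + d2) * 10 + d3) * 10 + d4) * 10 + d5 ∧
      Nat.toDigits 10 h = [d0.digitChar, d1.digitChar, d2.digitChar, d3.digitChar, d4.digitChar, d5.digitChar] := by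
  refine ⟨h / 100000, h / 10000 % 10, h / 1000 % 10, h / 100 % 10, h / 10 % 10, h % 10,
    by omega, by omega, by omega, by omega, by omega, by omega, by omega, by omega, ?_⟩
  set d0 := h / 100000; set d1 := h / 10000 % 10; set d2 := h / 1000 % 10
  set d3 := h / 100 % 10; set d4 := h / 10 % 10; set d5 := h % 10
  have e0 : Nat.toDigits 10 d0 = [d0.digitChar] := Nat.toDigits_of_lt_base (by omega)
  have e1 : Nat.toDigits 10 (10 * d0 + d1) = [d0.digitChar, d1.digitChar] := by
    rw [← Nat.toDigits_append_toDigits (by omega) (by omega) (by omega), e0,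
        Nat.toDigits_of_lt_base (by omega)]; rfl
  have e2 : Nat.toDigits 10 (10 * (10 * d0 + d1) + d2) = [d0.digitChar, d1.digitChar, d2.digitChar] := by
    rw [← Nat.toDigits_append_toDigits (by omega) (by omega) (by omega), e1,
        Nat.toDigits_of_lt_base (by omega)]; rfl
  have e3 : Nat.toDigits 10 (10 * (10 * (10 * d0 + d1) + d2) + d3) = [d0.digitChar, d1.digitChar, d2.digitChar, d3.digitChar] := by
    rw [← Nat.toDigits_append_toDigits (by omega) (by omega) (by omega), e2,
        Nat.toDigits_of_lt_base (by omega)]; rfl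
  have e4 : Nat.toDigits 10 (10 * (10 * (10 * (10 * d0 + d1) + d2) + d3) + d4) = [d0.digitChar, d1.digitChar, d2.digitChar, d3.digitChar, d4.digitChar] := by
    rw [← Nat.toDigits_append_toDigits (by omega) (by omega) (by omega), e3,
        Nat.toDigits_of_lt_base (by omega)]; rfl
  have e5 : Nat.toDigits 10 (10 * (10 * (10 * (10 * (10 * d0 + d1) + d2) + d3) + d4) + d5) = [d0.digitChar, d1.digitChar, d2.digitChar, d3.digitChar, d4.digitChar, d5.digitChar] := by
    rw [← Nat.toDigits_append_toDigits (by omega) (by omega) (by omega), e4,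
        Nat.toDigits_of_lt_base (by omega)]; rfl
  have hx : h = 10 * (10 * (10 * (10 * (10 * d0 + d1) + d2) + d3) + d4) + d5 := by omega
  rw [hx, e5]

lemma parse_digitChar (d : Nat) (hd : d < 10) :
    PySem.Int.ofChars? [Nat.digitChar d] = some (d : Int) := by
  interval_cases d <;> decide

lemma odd_term (d : Nat) (hd : d < 10) :
    (if 9 < (d : Int) * 2 then
        ((PySem.Int.toChars ((d : Int) * 2)).map (fun c => (PySem.Int.ofChars? [c]).getD 0)).sum
      else (d : Int) * 2) = PySem.List.pyGetD pvLuhn (d : Int) 0 := by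
  interval_cases d <;> decide

lemma even_term (X : Int) (d : Nat) (hd : d < 10) :
    (if 9 < (d : Int) * 1 then X else (d : Int) * 1) = (d : Int) := by
  rw [if_neg (by omega)]; ring

lemma final_eq (s : Int) :
    (if PySem.Int.mod s 10 = 0 then (0:Int) else 10 - PySem.Int.mod s 10) = PySem.Int.mod (-s) 10 := by
  rw [PySem.Int.mod_eq_emod_of_pos (by omega), PySem.Int.mod_eq_emod_of_pos (by omega)]
  split_ifs <;> omega

-- ===== VERDICT (by name: the statement is the Claim_ definition above) =====
theorem calculate_digit_spec : Claim_equal_calculate_digit := by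
  intro geocode _ hpre
  have hpre' : (100000 : Int) ≤ geocode := hpre
  show calculate_digit geocode = calculate_digit_alt geocode
  -- decompose geocode
  set m : Nat := geocode.toNat with hmdef
  have hm : geocode = (m : Int) := by omega
  obtain ⟨h, hstrip, hh1, hh2, suf, hsuf⟩ := pvStrip_spec m (by omega)
  obtain ⟨d0, d1, d2, d3, d4, d5, hd0p, hd0, hd1, hd2, hd3, hd4, hd5, hdec, hdig⟩ :=
    six_digits h hh1 hh2
  have hchars : Nat.toDigits 10 m =
      [d0.digitChar, d1.digitChar, d2.digitChar, d3.digitChar, d4.digitChar, d5.digitChar] ++ suf := by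
    rw [hsuf, hdig]
  -- the six character reads of A
  have htc : PySem.Int.toChars geocode =
      [d0.digitChar, d1.digitChar, d2.digitChar, d3.digitChar, d4.digitChar, d5.digitChar] ++ suf := by
    rw [PySem.Int.toChars, if_neg (by omega), ← hmdef, hchars]
  have hget : ∀ (k : Int) (d : Nat), 0 ≤ k → k < 6 →
      ([d0.digitChar, d1.digitChar, d2.digitChar, d3.digitChar, d4.digitChar, d5.digitChar] ++ suf)[k.toNat]? = some (Nat.digitChar d) →
      PySem.Str.pyGet? (PySem.Int.toStr geocode) k = some (Nat.digitChar d) := by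
    intro k d hk0 hk6 hx
    simp only [PySem.Str.pyGet?, PySem.Chars.pyGet?_eq_listPyGet?, PySem.Int.toList_toStr, htc]
    rw [PySem.List.pyGet?_of_nonneg _ hk0]
    exact hx
  have g0 := hget 0 d0 (by omega) (by omega) rfl
  have g1 := hget 1 d1 (by omega) (by omega) rfl
  have g2 := hget 2 d2 (by omega) (by omega) rfl
  have g3 := hget 3 d3 (by omega) (by omega) rfl
  have g4 := hget 4 d4 (by omega) (by omega) rfl
  have g5 := hget 5 d5 (by omega) (by omega) rfl
  have hr : PySem.List.pyRange 0 6 1 = [0, 1, 2, 3, 4, 5] := by decide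
  -- evaluate A
  have hA : calculate_digit geocode =
      (if PySem.Int.mod (((((( 0 + (d0:Int)) + PySem.List.pyGetD pvLuhn (d1:Int) 0) + (d2:Int)) + PySem.List.pyGetD pvLuhn (d3:Int) 0) + (d4:Int)) + PySem.List.pyGetD pvLuhn (d5:Int) 0) 10 = 0 then 0
       else 10 - PySem.Int.mod (((((( 0 + (d0:Int)) + PySem.List.pyGetD pvLuhn (d1:Int) 0) + (d2:Int)) + PySem.List.pyGetD pvLuhn (d3:Int) 0) + (d4:Int)) + PySem.List.pyGetD pvLuhn (d5:Int) 0) 10) := by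
    simp only [calculate_digit, hr, List.foldl, g0, g1, g2, g3, g4, g5]
    have p0 : PySem.List.pyGetD ([1,2,1,2,1,2,0] : List Int) 0 0 = 1 := by decide
    have p1 : PySem.List.pyGetD ([1,2,1,2,1,2,0] : List Int) 1 0 = 2 := by decide
    have p2 : PySem.List.pyGetD ([1,2,1,2,1,2,0] : List Int) 2 0 = 1 := by decide
    have p3 : PySem.List.pyGetD ([1,2,1,2,1,2,0] : List Int) 3 0 = 2 := by decide
    have p4 : PySem.List.pyGetD ([1,2,1,2,1,2,0] : List Int) 4 0 = 1 := by decide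
    have p5 : PySem.List.pyGetD ([1,2,1,2,1,2,0] : List Int) 5 0 = 2 := by decide
    simp only [Option.map_some, Option.getD_some, p0, p1, p2, p3, p4, p5]
    rw [parse_digitChar d0 hd0, parse_digitChar d1 hd1, parse_digitChar d2 hd2,
        parse_digitChar d3 hd3, parse_digitChar d4 hd4, parse_digitChar d5 hd5]
    simp only [Option.getD_some]
    rw [even_term _ d0 hd0, even_term _ d2 hd2, even_term _ d4 hd4,
        odd_term d1 hd1, odd_term d3 hd3, odd_term d5 hd5]
  -- evaluate B
  have hfd : ∀ n : Int, 0 ≤ n → PySem.Int.floordiv n 10 = n / 10 :=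
    fun n _ => PySem.Int.floordiv_eq_ediv_of_pos (by omega)
  have hmd : ∀ n : Int, PySem.Int.mod n 10 = n % 10 :=
    fun n => PySem.Int.mod_eq_emod_of_pos (by omega)
  have hhval : (h : Int) = (((((d0:Int) * 10 + d1) * 10 + d2) * 10 + d3) * 10 + d4) * 10 + d5 := by
    push_cast [hdec]; ring
  have hstrip' : pvStrip geocode = (h : Int) := by rw [hm, hstrip]
  have hB : calculate_digit_alt geocode =
      PySem.Int.mod (-(((((( 0 + PySem.List.pyGetD pvLuhn (d5:Int) 0) + (d4:Int)) + PySem.List.pyGetD pvLuhn (d3:Int) 0) + (d2:Int)) + PySem.List.pyGetD pvLuhn (d1:Int) 0) + (d0:Int))) 10 := by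
    have hcast : (h : Int) = (((((d0:Int) * 10 + d1) * 10 + d2) * 10 + d3) * 10 + d4) * 10 + d5 := hhval
    have m5 : PySem.Int.mod ((((((d0:Int) * 10 + d1) * 10 + d2) * 10 + d3) * 10 + d4) * 10 + d5) 10 = (d5:Int) := by
      rw [hmd]; omega
    have f5 : PySem.Int.floordiv ((((((d0:Int) * 10 + d1) * 10 + d2) * 10 + d3) * 10 + d4) * 10 + d5) 10 = ((((d0:Int) * 10 + d1) * 10 + d2) * 10 + d3) * 10 + d4 := by
      rw [hfd _ (by omega)]; omega
    have m4 : PySem.Int.mod (((((d0:Int) * 10 + d1) * 10 + d2) * 10 + d3) * 10 + d4) 10 = (d4:Int) := by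
      rw [hmd]; omega
    have f4 : PySem.Int.floordiv (((((d0:Int) * 10 + d1) * 10 + d2) * 10 + d3) * 10 + d4) 10 = (((d0:Int) * 10 + d1) * 10 + d2) * 10 + d3 := by
      rw [hfd _ (by omega)]; omega
    have m3 : PySem.Int.mod ((((d0:Int) * 10 + d1) * 10 + d2) * 10 + d3) 10 = (d3:Int) := by
      rw [hmd]; omega
    have f3 : PySem.Int.floordiv ((((d0:Int) * 10 + d1) * 10 + d2) * 10 + d3) 10 = ((d0:Int) * 10 + d1) * 10 + d2 := by
      rw [hfd _ (by omega)]; omega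
    have m2 : PySem.Int.mod (((d0:Int) * 10 + d1) * 10 + d2) 10 = (d2:Int) := by
      rw [hmd]; omega
    have f2 : PySem.Int.floordiv (((d0:Int) * 10 + d1) * 10 + d2) 10 = (d0:Int) * 10 + d1 := by
      rw [hfd _ (by omega)]; omega
    have m1 : PySem.Int.mod ((d0:Int) * 10 + d1) 10 = (d1:Int) := by
      rw [hmd]; omega
    have f1 : PySem.Int.floordiv ((d0:Int) * 10 + d1) 10 = (d0:Int) := by
      rw [hfd _ (by omega)]; omega
    have m0 : PySem.Int.mod (d0:Int) 10 = (d0:Int) := by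
      rw [hmd]; omega
    simp only [calculate_digit_alt, hr, List.foldl, hstrip', hcast,
      m5, f5, m4, f4, m3, f3, m2, f2, m1, f1, m0, Bool.not_true, Bool.not_false]
    simp
  rw [hA, hB, final_eq]
  congr 1
  ring
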